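-- pv_equiv track=rewrite | github.com/stenknutsen/HomeGrownPOSTagger | PhaseThreeTagging.py | that_UNK_out_VerbTagger
-- ===== SOURCE A (Python) =====
-- def that_UNK_out_VerbTagger(sent):
--     sentToReturn = []
--     skip = 0
--
--     for i in range(len(sent)):
--
--         if skip>0:
--             skip = skip -1
--             continue
--
--         if (i)<0 | (i+2)>=len(sent):
--             sentToReturn += [sent[i]]
--             continue
--
--         leftContext = sent[i]
--         target = sent[i+1]
--         rightContext = sent[i+2]
--
--         if (leftContext[1]=="WDT")&(leftContext[0].lower()=="that")&(rightContext[0].lower()=="out")&(target[1]=="UNK"):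
--
--             sentToReturn += [leftContext]
--             sentToReturn += [(target[0],"V")]
--             sentToReturn += [rightContext]
--             skip = 2
--
--         else:
--             sentToReturn += [leftContext]
--
--     return sentToReturn
-- ===== SOURCE B (Python) =====
-- def that_UNK_out_VerbTagger(sent):
--     out = list(sent)
--     for j in range(1, len(sent) - 1):
--         left, target, right = sent[j - 1], sent[j], sent[j + 1]
--         if (left[1] == "WDT") & (left[0].lower() == "that") & (right[0].lower() == "out") & (target[1] == "UNK"):
--             out[j] = (target[0], "V")
--     return out
-- ===== Notes on version B (the rewrite author's own statement) =====
-- stated objective: simpler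
-- what changed: Replaced A's skip-counter loop that incrementally appends tokens (emitting three on a match) with a single index pass over a shallow copy that retags the matched UNK token in place, valid because matches can never overlap.
import Mathlib
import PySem

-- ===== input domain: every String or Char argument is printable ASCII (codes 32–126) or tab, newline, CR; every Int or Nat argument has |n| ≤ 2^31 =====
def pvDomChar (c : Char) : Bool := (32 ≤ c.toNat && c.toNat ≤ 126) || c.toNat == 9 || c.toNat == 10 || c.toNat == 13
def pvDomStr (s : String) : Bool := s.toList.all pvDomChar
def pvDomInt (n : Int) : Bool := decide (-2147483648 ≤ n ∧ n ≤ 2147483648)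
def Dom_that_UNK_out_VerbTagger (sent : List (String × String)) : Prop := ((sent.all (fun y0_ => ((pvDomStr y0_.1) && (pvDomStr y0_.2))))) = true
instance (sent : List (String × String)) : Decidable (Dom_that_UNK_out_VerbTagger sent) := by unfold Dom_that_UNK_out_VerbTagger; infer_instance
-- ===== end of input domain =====

-- B replaces A's skip-counter append loop by a single pass over a copy of the list that retags
-- the matched UNK token in place (matches cannot overlap); same return value, objective: simpler.

-- ===== PORT A =====
-- A's window condition, non-short-circuit `&` chain kept in the same order.
def pvA_cond (left target right : String × String) : Bool :=
  (left.2 == "WDT") && (PySem.Str.lower left.1 == "that") &&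
  (PySem.Str.lower right.1 == "out") && (target.2 == "UNK")

-- A's loop: index i with the skip counter. Python's `(i)<0 | (i+2)>=len(sent)` is the chained
-- comparison `i < (0 | (i+2))  and  (0 | (i+2)) >= len(sent)`; ported literally (0 ||| (i + 2)).
-- All indices are in range when read, so Python's sent[…] is ported as getD.
def pvA_loop (sent : List (String × String)) (i skip : Nat) : List (String × String) :=
  if _h : i < sent.length then
    if skip > 0 then pvA_loop sent (i + 1) (skip - 1)
    else if i < (0 ||| (i + 2)) ∧ (0 ||| (i + 2)) ≥ sent.length then
      sent.getD i ("", "") :: pvA_loop sent (i + 1) 0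
    else if pvA_cond (sent.getD i ("", "")) (sent.getD (i + 1) ("", ""))
              (sent.getD (i + 2) ("", "")) then
      sent.getD i ("", "") :: ((sent.getD (i + 1) ("", "")).1, "V") ::
        sent.getD (i + 2) ("", "") :: pvA_loop sent (i + 1) 2
    else
      sent.getD i ("", "") :: pvA_loop sent (i + 1) 0
  else []
termination_by sent.length - i
decreasing_by all_goals omega

def that_UNK_out_VerbTagger (sent : List (String × String)) : List (String × String) :=
  pvA_loop sent 0 0

-- ===== PORT B =====
-- B's window condition (same non-short-circuit `&` chain as in Source B).
def pvB_cond (left target right : String × String) : Bool :=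
  (left.2 == "WDT") && (PySem.Str.lower left.1 == "that") &&
  (PySem.Str.lower right.1 == "out") && (target.2 == "UNK")

-- B's loop: j over range(1, len(sent)-1), out[j] updated in place on a match.
def pvB_loop (sent : List (String × String)) (out : List (String × String)) (j : Nat) :
    List (String × String) :=
  if _h : j + 1 < sent.length then
    pvB_loop sent
      (if pvB_cond (sent.getD (j - 1) ("", "")) (sent.getD j ("", ""))
            (sent.getD (j + 1) ("", "")) then
        out.set j ((sent.getD j ("", "")).1, "V")
      else out)
      (j + 1)
  else out
termination_by sent.length - j
decreasing_by omega

def that_UNK_out_VerbTagger_alt (sent : List (String × String)) : List (String × String) :=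
  pvB_loop sent sent 1

-- ===== PRECONDITION & SPEC =====
def Spec_that_UNK_out_VerbTagger (sent : List (String × String)) (out : List (String × String)) : Prop := out = that_UNK_out_VerbTagger_alt sent
instance (sent : List (String × String)) (out : List (String × String)) : Decidable (Spec_that_UNK_out_VerbTagger sent out) := by unfold Spec_that_UNK_out_VerbTagger; infer_instance

-- ===== CLAIM (what is proved, stated in full; the proofs are below) =====
def Claim_equal_that_UNK_out_VerbTagger : Prop := ∀ (sent : List (String × String)), Dom_that_UNK_out_VerbTagger sent → Spec_that_UNK_out_VerbTagger sent (that_UNK_out_VerbTagger sent)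

-- ===== LEMMAS AND PROOFS =====

-- `pvM sent i` : the three-token window of A starting at i (= B's window around i + 1) matches.
def pvM (sent : List (String × String)) (i : Nat) : Bool :=
  decide (i + 2 < sent.length) &&
    pvA_cond (sent.getD i ("", "")) (sent.getD (i + 1) ("", "")) (sent.getD (i + 2) ("", ""))

-- common pointwise target: from index i on, token k is retagged iff the window at k - 1 matches.
def pvSfx (sent : List (String × String)) (i : Nat) : List (String × String) :=
  if _h : i < sent.length then
    (if 1 ≤ i ∧ pvM sent (i - 1) = true then ((sent.getD i ("", "")).1, "V")
     else sent.getD i ("", "")) :: pvSfx sent (i + 1)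
  else []
termination_by sent.length - i

lemma pvB_cond_eq_pvA_cond : pvB_cond = pvA_cond := rfl

lemma pvM_lt (sent : List (String × String)) (i : Nat) (h : pvM sent i = true) :
    i + 2 < sent.length := by
  simp only [pvM, Bool.and_eq_true, decide_eq_true_eq] at h
  exact h.1

-- matches cannot overlap: a match at i forbids one at i + 1 (its left token is tagged UNK,
-- not WDT) and at i + 2 (its left token lowercases to "out", not "that").
lemma pvM_next (sent : List (String × String)) (i : Nat) (h : pvM sent i = true) :
    pvM sent (i + 1) = false ∧ pvM sent (i + 2) = false := by
  simp only [pvM, pvA_cond, Bool.and_eq_true, decide_eq_true_eq, beq_iff_eq] at h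
  refine ⟨?_, ?_⟩ <;>
    (rw [Bool.eq_false_iff]; intro hm;
     simp only [pvM, pvA_cond, Bool.and_eq_true, decide_eq_true_eq, beq_iff_eq] at hm)
  · exact absurd (h.2.2.symm.trans hm.2.1.1.1) (by decide)
  · exact absurd (h.2.1.2.symm.trans hm.2.1.1.2) (by decide)

-- skip = 2 just moves A's cursor from i + 1 to i + 3
lemma pvA_skip (sent : List (String × String)) (i : Nat) (h : i + 2 < sent.length) :
    pvA_loop sent (i + 1) 2 = pvA_loop sent (i + 3) 0 := by
  rw [pvA_loop, dif_pos (by omega), if_pos (by omega),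
      pvA_loop, dif_pos (by omega), if_pos (by omega)]

lemma pvA_eq_pvSfx (sent : List (String × String)) :
    ∀ n i, sent.length - i ≤ n → (i = 0 ∨ pvM sent (i - 1) = false) →
      pvA_loop sent i 0 = pvSfx sent i := by
  intro n
  induction n with
  | zero =>
    intro i hn _
    rw [pvA_loop, dif_neg (by omega), pvSfx, dif_neg (by omega)]
  | succ n ih =>
    intro i hn hprev
    by_cases hi : i < sent.length
    · have hhead : ¬ (1 ≤ i ∧ pvM sent (i - 1) = true) := by
        rcases hprev with h0 | hf
        · omega
        · simp [hf]
      by_cases hb : i + 2 ≥ sent.length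
      · rw [pvA_loop, dif_pos hi, if_neg (by omega),
            if_pos (by simp only [Nat.zero_or]; omega),
            pvSfx, dif_pos hi, if_neg hhead]
        have hm : pvM sent i = false := by
          simp [pvM, show ¬ (i + 2 < sent.length) from by omega]
        exact congrArg _ (ih (i + 1) (by omega) (Or.inr (by simpa using hm)))
      · rw [pvA_loop, dif_pos hi, if_neg (by omega),
            if_neg (by simp only [Nat.zero_or]; omega)]
        by_cases hc : pvA_cond (sent.getD i ("", "")) (sent.getD (i + 1) ("", ""))
            (sent.getD (i + 2) ("", "")) = true
        · rw [if_pos hc, pvA_skip sent i (by omega)]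
          have hm : pvM sent i = true := by
            simp only [pvM, hc, Bool.and_true, decide_eq_true_eq]; omega
          obtain ⟨h1, h2⟩ := pvM_next sent i hm
          rw [pvSfx, dif_pos hi, if_neg hhead,
              pvSfx, dif_pos (by omega), if_pos ⟨by omega, by simpa using hm⟩,
              pvSfx, dif_pos (by omega), if_neg (by simp [show i + 2 - 1 = i + 1 from by omega, h1]),
              ih (i + 3) (by omega) (Or.inr (by simpa using h2))]
        · rw [if_neg hc]
          have hcf : pvA_cond (sent.getD i ("", "")) (sent.getD (i + 1) ("", ""))
              (sent.getD (i + 2) ("", "")) = false := by simpa using hc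
          have hm : pvM sent i = false := by
            simp only [pvM, hcf, Bool.and_false]
          rw [pvSfx, dif_pos hi, if_neg hhead]
          exact congrArg _ (ih (i + 1) (by omega) (Or.inr (by simpa using hm)))
    · rw [pvA_loop, dif_neg hi, pvSfx, dif_neg hi]

lemma pvSfx_get (sent : List (String × String)) :
    ∀ n i, sent.length - i ≤ n → ∀ k : Nat,
      (pvSfx sent i)[k]? =
        if i + k < sent.length then
          some (if 1 ≤ i + k ∧ pvM sent (i + k - 1) = true
                then ((sent.getD (i + k) ("", "")).1, "V") else sent.getD (i + k) ("", ""))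
        else none := by
  intro n
  induction n with
  | zero =>
    intro i hn k
    rw [pvSfx, dif_neg (by omega), if_neg (by omega)]
    simp
  | succ n ih =>
    intro i hn k
    by_cases hi : i < sent.length
    · rw [pvSfx, dif_pos hi]
      cases k with
      | zero =>
        simp only [List.getElem?_cons_zero, Nat.add_zero]
        rw [if_pos hi]
      | succ k =>
        simp only [List.getElem?_cons_succ]
        rw [ih (i + 1) (by omega) k, show i + 1 + k = i + (k + 1) from by omega]
    · rw [pvSfx, dif_neg hi, if_neg (by omega)]
      simp

lemma pvB_get (sent : List (String × String)) :
    ∀ n j out, sent.length - j ≤ n → 1 ≤ j → out.length = sent.length → ∀ k : Nat,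
      (pvB_loop sent out j)[k]? =
        if j ≤ k ∧ pvM sent (k - 1) = true
        then some ((sent.getD k ("", "")).1, "V") else out[k]? := by
  intro n
  induction n with
  | zero =>
    intro j out hn h1 hlen k
    rw [pvB_loop, dif_neg (by omega),
        if_neg (fun hc => by have := pvM_lt sent _ hc.2; omega)]
  | succ n ih =>
    intro j out hn h1 hlen k
    by_cases hj : j + 1 < sent.length
    · rw [pvB_loop, dif_pos hj]
      have hM : pvM sent (j - 1) = pvB_cond (sent.getD (j - 1) ("", ""))
          (sent.getD j ("", "")) (sent.getD (j + 1) ("", "")) := by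
        simp only [pvM, pvB_cond_eq_pvA_cond,
          show j - 1 + 1 = j from by omega, show j - 1 + 2 = j + 1 from by omega]
        simp [hj]
      by_cases hc : pvB_cond (sent.getD (j - 1) ("", "")) (sent.getD j ("", ""))
          (sent.getD (j + 1) ("", "")) = true
      · rw [if_pos hc,
            ih (j + 1) _ (by omega) (by omega) (by rw [List.length_set]; exact hlen) k]
        by_cases hmk : pvM sent (k - 1) = true
        · by_cases hkj : k = j
          · subst hkj
            rw [if_neg (by omega), if_pos ⟨le_refl _, hmk⟩, List.getElem?_set,
                if_pos rfl, if_pos (by omega)]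
          · by_cases hjk : j ≤ k
            · rw [if_pos ⟨by omega, hmk⟩, if_pos ⟨hjk, hmk⟩]
            · rw [if_neg (by omega), if_neg (by omega), List.getElem?_set,
                  if_neg (by omega)]
        · have hkj : k ≠ j := by
            intro e; subst e; exact hmk (hM.trans hc)
          rw [if_neg (by simp [hmk]), if_neg (by simp [hmk]), List.getElem?_set,
              if_neg (fun e => hkj e.symm)]
      · rw [if_neg hc, ih (j + 1) out (by omega) (by omega) hlen k]
        by_cases hmk : pvM sent (k - 1) = true
        · by_cases hkj : k = j
          · subst hkj
            exact absurd (hM.symm.trans hmk) hc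
          · by_cases hjk : j ≤ k
            · rw [if_pos ⟨by omega, hmk⟩, if_pos ⟨hjk, hmk⟩]
            · rw [if_neg (by omega), if_neg (by omega)]
        · rw [if_neg (by simp [hmk]), if_neg (by simp [hmk])]
    · rw [pvB_loop, dif_neg hj,
          if_neg (fun hc => by have := pvM_lt sent _ hc.2; omega)]

-- ===== VERDICT (by name: the statement is the Claim_ definition above) =====
theorem that_UNK_out_VerbTagger_spec : Claim_equal_that_UNK_out_VerbTagger := by
  intro sent _
  unfold Spec_that_UNK_out_VerbTagger that_UNK_out_VerbTagger that_UNK_out_VerbTagger_alt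
  rw [pvA_eq_pvSfx sent sent.length 0 (by omega) (Or.inl rfl)]
  apply List.ext_getElem?
  intro k
  rw [pvSfx_get sent sent.length 0 (by omega) k,
      pvB_get sent sent.length 1 sent (by omega) (by omega) rfl k]
  simp only [Nat.zero_add]
  by_cases hmk : 1 ≤ k ∧ pvM sent (k - 1) = true
  · have hk : k < sent.length := by
      have := pvM_lt sent (k - 1) hmk.2; omega
    rw [if_pos hk, if_pos hmk, if_pos hmk]
  · by_cases hk : k < sent.length
    · rw [if_pos hk, if_neg hmk, if_neg hmk, List.getD_eq_getElem?_getD,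
          List.getElem?_eq_getElem hk]
      rfl
    · rw [if_neg hk, if_neg hmk, List.getElem?_eq_none (by omega)]
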